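-- pv_equiv track=rewrite | github.com/Richardyang510/adventofcode2020 | day11/main.py | p2_iterate
-- ===== SOURCE A (Python) =====
-- import copy
--
-- dir_r = [-1, -1, -1, 0, 1, 1, 1, 0]
--
-- dir_c = [-1, 0, 1, 1, 1, 0, -1, -1]
--
-- def p2_iterate(fp):
--     fp_cp = copy.deepcopy(fp)
--     for r in range(len(fp)):
--         for c in range(len(fp[0])):
--             if fp[r][c] == '.':
--                 continue
--             num_occ = 0
--             num_emp = 0
--
--             for d in range(8):
--                 new_r = r + dir_r[d]
--                 new_c = c + dir_c[d]
--                 while 0 <= new_r < len(fp) and 0 <= new_c < len(fp[0]):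
--                     if fp[new_r][new_c] == '#':
--                         num_occ += 1
--                         break
--                     elif fp[new_r][new_c] == 'L':
--                         break
--                     new_r += dir_r[d]
--                     new_c += dir_c[d]
--
--             if num_occ >= 5:
--                 fp_cp[r][c] = 'L'
--             elif num_occ == 0:
--                 fp_cp[r][c] = '#'
--     return fp_cp
-- ===== SOURCE B (Python) =====
-- SEATS = ('#', 'L')
--
-- def _vert_row(fp, R, W, dc, nr, prev):
--     # visibility row for looking toward row nr (one step of a vertical/diagonal sweep)
--     if 0 <= nr < R:
--         cur = []
--         for c in range(W):
--             nc = c + dc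
--             if 0 <= nc < W:
--                 v = fp[nr][nc]
--                 cur.append(v if v in SEATS else prev[nc])
--             else:
--                 cur.append(None)
--         return cur
--     return [None] * W
--
-- def _sweep_vert(fp, R, W, dr, dc):
--     # grid[r][c] = nearest visible seat from (r, c) looking in direction (dr, dc)
--     vis = []
--     prev = []
--     if dr == -1:
--         for r in range(R):
--             prev = _vert_row(fp, R, W, dc, r + dr, prev)
--             vis.append(prev)
--     else:
--         for r in range(R - 1, -1, -1):
--             prev = _vert_row(fp, R, W, dc, r + dr, prev)
--             vis.insert(0, prev)
--     return vis
--
-- def _row_left(W, row):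
--     # res[c] = nearest seat strictly to the left of c
--     res = []
--     last = None
--     for c in range(W):
--         res.append(last)
--         v = row[c]
--         if v in SEATS:
--             last = v
--     return res
--
-- def _row_right(W, row):
--     # res[c] = nearest seat strictly to the right of c
--     res = []
--     last = None
--     for c in range(W - 1, -1, -1):
--         res.insert(0, last)
--         v = row[c]
--         if v in SEATS:
--             last = v
--     return res
--
-- def p2_iterate(fp):
--     R = len(fp)
--     W = len(fp[0]) if fp else 0
--     grids = [_sweep_vert(fp, R, W, -1, -1), _sweep_vert(fp, R, W, -1, 0),
--              _sweep_vert(fp, R, W, -1, 1), _sweep_vert(fp, R, W, 1, -1),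
--              _sweep_vert(fp, R, W, 1, 0), _sweep_vert(fp, R, W, 1, 1),
--              [_row_left(W, row) for row in fp], [_row_right(W, row) for row in fp]]
--     occ = [[sum(1 for g in grids if g[r][c] == '#') for c in range(W)]
--            for r in range(R)]
--     out = [list(row) for row in fp]
--     for r in range(R):
--         for c in range(W):
--             if fp[r][c] == '.':
--                 continue
--             n = occ[r][c]
--             if n >= 5:
--                 out[r][c] = 'L'
--             elif n == 0:
--                 out[r][c] = '#'
--     return out
-- ===== Notes on version B (the rewrite author's own statement) =====
-- stated objective: faster
-- what changed: Replaces A's per-cell ray walk in 8 directions (re-scanning each line of sight) by 8 whole-grid line sweeps that carry the nearest visible seat per direction row by row, then O(1) per-cell counting.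
import Mathlib
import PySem

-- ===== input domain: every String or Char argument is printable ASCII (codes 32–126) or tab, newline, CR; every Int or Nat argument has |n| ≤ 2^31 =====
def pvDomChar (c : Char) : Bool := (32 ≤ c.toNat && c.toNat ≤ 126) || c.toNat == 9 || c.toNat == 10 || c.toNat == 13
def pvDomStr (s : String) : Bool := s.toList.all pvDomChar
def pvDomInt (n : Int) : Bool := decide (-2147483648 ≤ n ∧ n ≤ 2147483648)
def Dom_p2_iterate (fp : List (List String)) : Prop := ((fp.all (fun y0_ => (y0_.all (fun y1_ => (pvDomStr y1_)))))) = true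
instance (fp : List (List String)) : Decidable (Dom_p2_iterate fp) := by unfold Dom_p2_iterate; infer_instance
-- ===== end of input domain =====

-- B replaces A's per-cell ray walks by 8 whole-grid line sweeps (nearest visible seat
-- carried along each line of sight), making the neighbour count O(1) per cell.


-- ===== PORT A =====
def pvDirR : List Int := [-1, -1, -1, 0, 1, 1, 1, 0]
def pvDirC : List Int := [-1, 0, 1, 1, 1, 0, -1, -1]

def pvCellA (fp : List (List String)) (r c : Int) : String :=
  PySem.List.pyGetD (PySem.List.pyGetD fp r []) c ""

-- A's inner while loop.  The fuel (R+W).toNat+1 is an upper bound on its iteration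
-- count (each step moves one coordinate monotonically toward a bound), so this
-- recursion performs exactly the Python loop's steps.
def pvWalkA (fp : List (List String)) (R W dr dc : Int) : Nat → Int → Int → Int
  | 0, _, _ => 0
  | fuel+1, nr, nc =>
    if 0 ≤ nr ∧ nr < R ∧ 0 ≤ nc ∧ nc < W then
      if pvCellA fp nr nc = "#" then 1
      else if pvCellA fp nr nc = "L" then 0
      else pvWalkA fp R W dr dc fuel (nr + dr) (nc + dc)
    else 0

def pvSetCellA (g : List (List String)) (r c : Int) (v : String) : List (List String) :=
  PySem.List.pySetD g r (PySem.List.pySetD (PySem.List.pyGetD g r []) c v)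

-- num_emp in A is dead (never incremented, never read); it is not carried here.
def p2_iterate (fp : List (List String)) : List (List String) :=
  let R : Int := fp.length
  let W : Int := (PySem.List.pyGetD fp 0 []).length
  (PySem.List.pyRange 0 R 1).foldl (fun fpcp r =>
    (PySem.List.pyRange 0 W 1).foldl (fun fpcp c =>
      if pvCellA fp r c = "." then fpcp
      else
        let numOcc : Int := (PySem.List.pyRange 0 8 1).foldl (fun occ d =>
          let dr := PySem.List.pyGetD pvDirR d 0
          let dc := PySem.List.pyGetD pvDirC d 0
          occ + pvWalkA fp R W dr dc ((R + W).toNat + 1) (r + dr) (c + dc)) 0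
        if 5 ≤ numOcc then pvSetCellA fpcp r c "L"
        else if numOcc = 0 then pvSetCellA fpcp r c "#"
        else fpcp) fpcp) fp

-- ===== PORT B =====
def pvSeat (v : String) : Bool := v == "#" || v == "L"

def pvCellB (fp : List (List String)) (r c : Int) : String :=
  PySem.List.pyGetD (PySem.List.pyGetD fp r []) c ""

def pvSetCellB (g : List (List String)) (r c : Int) (v : String) : List (List String) :=
  PySem.List.pySetD g r (PySem.List.pySetD (PySem.List.pyGetD g r []) c v)

-- one row of a vertical/diagonal sweep (_vert_row in Source B)
def pvVertRow (fp : List (List String)) (R W dc nr : Int) (prev : List (Option String)) :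
    List (Option String) :=
  if 0 ≤ nr ∧ nr < R then
    (PySem.List.pyRange 0 W 1).map (fun c =>
      let nc := c + dc
      if 0 ≤ nc ∧ nc < W then
        if pvSeat (pvCellB fp nr nc) then some (pvCellB fp nr nc)
        else PySem.List.pyGetD prev nc none
      else none)
  else List.replicate W.toNat none

-- _sweep_vert in Source B: grid[r][c] = nearest visible seat from (r,c) in direction (dr,dc)
def pvSweepVert (fp : List (List String)) (R W dr dc : Int) : List (List (Option String)) :=
  if dr = -1 then
    ((PySem.List.pyRange 0 R 1).foldl (fun st r =>
        let cur := pvVertRow fp R W dc (r + dr) st.2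
        (st.1 ++ [cur], cur))
      (([] : List (List (Option String))), ([] : List (Option String)))).1
  else
    ((PySem.List.pyRange (R - 1) (-1) (-1)).foldl (fun st r =>
        let cur := pvVertRow fp R W dc (r + dr) st.2
        (cur :: st.1, cur))
      (([] : List (List (Option String))), ([] : List (Option String)))).1

-- _row_left in Source B: res[c] = nearest seat strictly left of c
def pvRowL (W : Int) (row : List String) : List (Option String) :=
  ((PySem.List.pyRange 0 W 1).foldl (fun st c =>
      let v := PySem.List.pyGetD row c ""
      (st.1 ++ [st.2], if pvSeat v then some v else st.2))
    (([] : List (Option String)), (none : Option String))).1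

-- _row_right in Source B: res[c] = nearest seat strictly right of c
def pvRowR (W : Int) (row : List String) : List (Option String) :=
  ((PySem.List.pyRange (W - 1) (-1) (-1)).foldl (fun st c =>
      let v := PySem.List.pyGetD row c ""
      (st.2 :: st.1, if pvSeat v then some v else st.2))
    (([] : List (Option String)), (none : Option String))).1

def pvGrid2 (g : List (List (Option String))) (r c : Int) : Option String :=
  PySem.List.pyGetD (PySem.List.pyGetD g r []) c none

def pvOcc2 (g : List (List Int)) (r c : Int) : Int :=
  PySem.List.pyGetD (PySem.List.pyGetD g r []) c 0

def p2_iterate_alt (fp : List (List String)) : List (List String) :=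
  let R : Int := fp.length
  let W : Int := (PySem.List.pyGetD fp 0 []).length
  let grids : List (List (List (Option String))) :=
    [pvSweepVert fp R W (-1) (-1), pvSweepVert fp R W (-1) 0, pvSweepVert fp R W (-1) 1,
     pvSweepVert fp R W 1 (-1), pvSweepVert fp R W 1 0, pvSweepVert fp R W 1 1,
     fp.map (fun row => pvRowL W row), fp.map (fun row => pvRowR W row)]
  let occ : List (List Int) :=
    (PySem.List.pyRange 0 R 1).map (fun r =>
      (PySem.List.pyRange 0 W 1).map (fun c =>
        grids.foldl (fun s g => if pvGrid2 g r c = some "#" then s + 1 else s) (0 : Int)))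
  (PySem.List.pyRange 0 R 1).foldl (fun out r =>
    (PySem.List.pyRange 0 W 1).foldl (fun out c =>
      if pvCellB fp r c = "." then out
      else
        let n := pvOcc2 occ r c
        if 5 ≤ n then pvSetCellB out r c "L"
        else if n = 0 then pvSetCellB out r c "#"
        else out) out) (fp.map (fun row => row))

-- ===== PRECONDITION & SPEC =====
-- Pre_ excludes exactly the inputs where A raises IndexError: a row shorter than the
-- first row (A reads and writes every column index below len(fp[0]) in every row).
def Pre_p2_iterate (fp : List (List String)) : Prop :=
  ∀ row ∈ fp, (fp.headD []).length ≤ row.length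
instance (fp : List (List String)) : Decidable (Pre_p2_iterate fp) := by
  unfold Pre_p2_iterate; infer_instance

def pvWitness_p2_iterate : List (List String) :=
  [["L", ".", "#"], [".", "L", "."]]

def Spec_p2_iterate (fp : List (List String)) (out : List (List String)) : Prop := out = p2_iterate_alt fp
instance (fp : List (List String)) (out : List (List String)) : Decidable (Spec_p2_iterate fp out) := by unfold Spec_p2_iterate; infer_instance

-- ===== CLAIM (what is proved, stated in full; the proofs are below) =====
def Claim_equal_p2_iterate : Prop := ∀ (fp : List (List String)), Dom_p2_iterate fp → Pre_p2_iterate fp → Spec_p2_iterate fp (p2_iterate fp)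

-- ===== LEMMAS AND PROOFS =====

-- the 8 directions (as (dr, dc) pairs)
def pvDirsSpec : List (Int × Int) :=
  [(-1, -1), (-1, 0), (-1, 1), (0, -1), (0, 1), (1, -1), (1, 0), (1, 1)]

def pvMeasure (R W dr dc r c : Int) : Nat :=
  if dr = -1 then (r + 1).toNat
  else if dr = 1 then (R - r).toNat
  else if dc = -1 then (c + 1).toNat
  else (W - c).toNat

-- the nearest visible seat from (r,c) scanning (r,c), (r+dr,c+dc), … (inclusive)
def pvVis (fp : List (List String)) (R W dr dc : Int)
    (hd : (dr, dc) ∈ pvDirsSpec) (r c : Int) : Option String :=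
  if 0 ≤ r ∧ r < R ∧ 0 ≤ c ∧ c < W then
    if pvSeat (pvCellB fp r c) then some (pvCellB fp r c)
    else pvVis fp R W dr dc hd (r + dr) (c + dc)
  else none
termination_by pvMeasure R W dr dc r c
decreasing_by
  simp only [pvDirsSpec, List.mem_cons, List.not_mem_nil, or_false, Prod.mk.injEq] at hd
  rcases hd with ⟨rfl, rfl⟩ | ⟨rfl, rfl⟩ | ⟨rfl, rfl⟩ | ⟨rfl, rfl⟩ | ⟨rfl, rfl⟩ | ⟨rfl, rfl⟩ | ⟨rfl, rfl⟩ | ⟨rfl, rfl⟩ <;>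
    simp [pvMeasure] <;> omega


theorem pvCellA_eq (fp : List (List String)) (r c : Int) : pvCellA fp r c = pvCellB fp r c := rfl

theorem pvMeasure_pos (R W dr dc r c : Int) (hd : (dr, dc) ∈ pvDirsSpec)
    (h : 0 ≤ r ∧ r < R ∧ 0 ≤ c ∧ c < W) : 1 ≤ pvMeasure R W dr dc r c := by
  simp only [pvDirsSpec, List.mem_cons, List.not_mem_nil, or_false, Prod.mk.injEq] at hd
  rcases hd with ⟨rfl, rfl⟩ | ⟨rfl, rfl⟩ | ⟨rfl, rfl⟩ | ⟨rfl, rfl⟩ | ⟨rfl, rfl⟩ | ⟨rfl, rfl⟩ | ⟨rfl, rfl⟩ | ⟨rfl, rfl⟩ <;>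
    simp [pvMeasure] <;> omega

theorem pvMeasure_step (R W dr dc r c : Int) (hd : (dr, dc) ∈ pvDirsSpec)
    (h : 0 ≤ r ∧ r < R ∧ 0 ≤ c ∧ c < W) :
    pvMeasure R W dr dc (r + dr) (c + dc) < pvMeasure R W dr dc r c := by
  simp only [pvDirsSpec, List.mem_cons, List.not_mem_nil, or_false, Prod.mk.injEq] at hd
  rcases hd with ⟨rfl, rfl⟩ | ⟨rfl, rfl⟩ | ⟨rfl, rfl⟩ | ⟨rfl, rfl⟩ | ⟨rfl, rfl⟩ | ⟨rfl, rfl⟩ | ⟨rfl, rfl⟩ | ⟨rfl, rfl⟩ <;>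
    simp [pvMeasure] <;> omega

theorem pvWalkA_eq (fp : List (List String)) (R W dr dc : Int) (hd : (dr, dc) ∈ pvDirsSpec) :
    ∀ (fuel : Nat) (r c : Int), pvMeasure R W dr dc r c ≤ fuel →
      pvWalkA fp R W dr dc fuel r c =
        (if pvVis fp R W dr dc hd r c = some "#" then 1 else 0) := by
  intro fuel
  induction fuel with
  | zero =>
    intro r c hle
    have hnb : ¬ (0 ≤ r ∧ r < R ∧ 0 ≤ c ∧ c < W) := fun h => by
      have := pvMeasure_pos R W dr dc r c hd h; omega
    rw [pvVis]
    simp [pvWalkA, hnb]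
  | succ n ih =>
    intro r c hle
    rw [pvVis]
    by_cases h : 0 ≤ r ∧ r < R ∧ 0 ≤ c ∧ c < W
    · simp only [pvWalkA, if_pos h]
      by_cases h1 : pvCellA fp r c = "#"
      · have hs : pvSeat (pvCellB fp r c) = true := by
          simp [pvSeat, ← pvCellA_eq, h1]
        simp [h1, ← pvCellA_eq, pvSeat]
      · by_cases h2 : pvCellA fp r c = "L"
        · have hs : pvSeat (pvCellB fp r c) = true := by
            simp [pvSeat, ← pvCellA_eq, h2]
          simp [h2, ← pvCellA_eq, pvSeat]
        · have hs : pvSeat (pvCellB fp r c) = false := by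
            simp [pvSeat, ← pvCellA_eq, h1, h2]
          have hnext : pvMeasure R W dr dc (r + dr) (c + dc) ≤ n := by
            have := pvMeasure_step R W dr dc r c hd h; omega
          simp only [h1, h2, hs, if_false, Bool.false_eq_true]
          exact ih (r + dr) (c + dc) hnext
    · simp [pvWalkA, h]

def pvVisRow (fp : List (List String)) (R W dr dc : Int) (hd : (dr, dc) ∈ pvDirsSpec)
    (r : Int) : List (Option String) :=
  (PySem.List.pyRange 0 W 1).map (fun c => pvVis fp R W dr dc hd (r + dr) (c + dc))

theorem pvVertRow_eq (fp : List (List String)) (R W dr dc : Int) (hd : (dr, dc) ∈ pvDirsSpec)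
    (r : Int) (prev : List (Option String))
    (hprev : (0 ≤ r + dr ∧ r + dr < R) → prev = pvVisRow fp R W dr dc hd (r + dr)) :
    pvVertRow fp R W dc (r + dr) prev = pvVisRow fp R W dr dc hd r := by
  by_cases hb : 0 ≤ r + dr ∧ r + dr < R
  · unfold pvVertRow pvVisRow
    rw [if_pos hb]
    apply List.map_congr_left
    intro c hc
    have hc' : 0 ≤ c ∧ c < W := by
      simpa [PySem.List.mem_pyRange_one] using hc
    by_cases hcb : 0 ≤ c + dc ∧ c + dc < W
    · have h4 : 0 ≤ r + dr ∧ r + dr < R ∧ 0 ≤ c + dc ∧ c + dc < W :=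
        ⟨hb.1, hb.2, hcb.1, hcb.2⟩
      rw [pvVis, if_pos h4, if_pos hcb]
      by_cases hs : pvSeat (pvCellB fp (r + dr) (c + dc)) = true
      · simp [hs]
      · simp only [hs, if_neg, Bool.not_eq_true] at *
        rw [hprev hb]
        unfold pvVisRow
        rw [PySem.List.pyGetD_map_pyRange_of_nonneg _ _ _ _ hcb.1 hcb.2]
    · rw [pvVis, if_neg (by tauto)]
      simp [hcb]
  · unfold pvVertRow pvVisRow
    rw [if_neg hb]
    symm
    rw [List.eq_replicate_iff]
    constructor
    · simp [PySem.List.length_pyRange_one]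
    · intro b hbm
      obtain ⟨c, hc, rfl⟩ := List.mem_map.mp hbm
      rw [pvVis, if_neg (by tauto)]

theorem pvSweepVert_up (fp : List (List String)) (R W dc : Int)
    (hd : ((-1 : Int), dc) ∈ pvDirsSpec) (hR : 0 ≤ R) :
    pvSweepVert fp R W (-1) dc =
      (PySem.List.pyRange 0 R 1).map (pvVisRow fp R W (-1) dc hd) := by
  have key : ∀ n : Nat,
      ((PySem.List.pyRange 0 (n : Int) 1).foldl (fun st r =>
          let cur := pvVertRow fp R W dc (r + -1) st.2
          (st.1 ++ [cur], cur))
        (([] : List (List (Option String))), ([] : List (Option String)))) =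
      ((PySem.List.pyRange 0 (n : Int) 1).map (pvVisRow fp R W (-1) dc hd),
       if n = 0 then [] else pvVisRow fp R W (-1) dc hd ((n : Int) - 1)) := by
    intro n
    induction n with
    | zero => simp [PySem.List.pyRange_one_eq_nil]
    | succ m ih =>
      have hcast : ((m + 1 : Nat) : Int) = (m : Int) + 1 := by omega
      rw [hcast, PySem.List.pyRange_one_succ_right (by positivity), List.foldl_append, ih,
          List.map_append]
      simp only [List.foldl_cons, List.foldl_nil]
      have hrow : pvVertRow fp R W dc ((m : Int) + -1)
            (if m = 0 then [] else pvVisRow fp R W (-1) dc hd ((m : Int) - 1)) =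
          pvVisRow fp R W (-1) dc hd (m : Int) := by
        apply pvVertRow_eq
        intro hbb
        have hm : ¬ (m = 0) := by
          rcases hbb with ⟨hb1, _⟩; omega
        rw [if_neg hm]
        congr 1
      simp only [Prod.mk.injEq]
      constructor
      · rw [hrow]
        simp
      · rw [hrow, if_neg (by omega)]
        congr 1
        push_cast
        ring
  unfold pvSweepVert
  rw [if_pos rfl]
  obtain ⟨n, rfl⟩ : ∃ n : Nat, R = (n : Int) := ⟨R.toNat, by omega⟩
  rw [key n]

theorem pvRange_neg_one_snoc (a b : Int) (h : b < a) :
    PySem.List.pyRange a b (-1) = PySem.List.pyRange a (b + 1) (-1) ++ [b + 1] := by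
  rw [PySem.List.pyRange_neg_one_eq_reverse, PySem.List.pyRange_neg_one_eq_reverse,
      PySem.List.pyRange_one_cons (by omega)]
  simp

theorem pvSweepVert_down (fp : List (List String)) (R W dc : Int)
    (hd : ((1 : Int), dc) ∈ pvDirsSpec) (hR : 0 ≤ R) :
    pvSweepVert fp R W 1 dc =
      (PySem.List.pyRange 0 R 1).map (pvVisRow fp R W 1 dc hd) := by
  have key : ∀ n : Nat,
      ((PySem.List.pyRange (R - 1) (R - 1 - (n : Int)) (-1)).foldl (fun st r =>
          let cur := pvVertRow fp R W dc (r + 1) st.2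
          (cur :: st.1, cur))
        (([] : List (List (Option String))), ([] : List (Option String)))) =
      ((PySem.List.pyRange (R - (n : Int)) R 1).map (pvVisRow fp R W 1 dc hd),
       if n = 0 then [] else pvVisRow fp R W 1 dc hd (R - (n : Int))) := by
    intro n
    induction n with
    | zero => simp [PySem.List.pyRange_neg_one_eq_nil, PySem.List.pyRange_one_eq_nil]
    | succ m ih =>
      have hcast : ((m + 1 : Nat) : Int) = (m : Int) + 1 := by omega
      have hsplit : PySem.List.pyRange (R - 1) (R - 1 - ((m + 1 : Nat) : Int)) (-1) =
          PySem.List.pyRange (R - 1) (R - 1 - (m : Int)) (-1) ++ [R - 1 - (m : Int)] := by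
        rw [hcast, pvRange_neg_one_snoc _ _ (by omega)]
        congr 1 <;> ring
      rw [hsplit, List.foldl_append, ih]
      simp only [List.foldl_cons, List.foldl_nil]
      have hrow : pvVertRow fp R W dc ((R - 1 - (m : Int)) + 1)
            (if m = 0 then [] else pvVisRow fp R W 1 dc hd (R - (m : Int))) =
          pvVisRow fp R W 1 dc hd (R - 1 - (m : Int)) := by
        have := pvVertRow_eq fp R W 1 dc hd (R - 1 - (m : Int))
            (if m = 0 then [] else pvVisRow fp R W 1 dc hd (R - (m : Int)))
            (by
              intro hbb
              rcases hbb with ⟨_, hb2⟩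
              have hm : ¬ (m = 0) := by omega
              rw [if_neg hm]
              congr 1
              ring)
        simpa using this
      simp only [Prod.mk.injEq]
      constructor
      · rw [hrow, hcast]
        conv_rhs => rw [PySem.List.pyRange_one_cons (show R - ((m : Int) + 1) < R by omega),
            List.map_cons]
        rw [show R - ((m : Int) + 1) = R - 1 - (m : Int) by ring,
            show R - 1 - (m : Int) + 1 = R - (m : Int) by ring]
      · rw [hrow, if_neg (by omega), hcast,
            show R - ((m : Int) + 1) = R - 1 - (m : Int) by ring]
  unfold pvSweepVert
  rw [if_neg (by norm_num)]
  obtain ⟨n, rfl⟩ : ∃ n : Nat, R = (n : Int) := ⟨R.toNat, by omega⟩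
  have h1 : PySem.List.pyRange ((n : Int) - 1) (-1) (-1) =
      PySem.List.pyRange ((n : Int) - 1) ((n : Int) - 1 - (n : Int)) (-1) := by
    congr 1
    ring
  rw [h1, key n, show (n : Int) - (n : Int) = 0 by ring]

def pvLastL (W : Int) (row : List String) (c : Int) : Option String :=
  if 0 ≤ c ∧ c < W then
    (let v := PySem.List.pyGetD row c ""
     if pvSeat v then some v else pvLastL W row (c - 1))
  else none
termination_by (c + 1).toNat
decreasing_by omega

def pvLastR (W : Int) (row : List String) (c : Int) : Option String :=
  if 0 ≤ c ∧ c < W then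
    (let v := PySem.List.pyGetD row c ""
     if pvSeat v then some v else pvLastR W row (c + 1))
  else none
termination_by (W - c).toNat
decreasing_by omega

theorem pvLastL_eq (fp : List (List String)) (R W : Int)
    (hd : ((0 : Int), (-1 : Int)) ∈ pvDirsSpec) (r : Int) (hr : 0 ≤ r ∧ r < R) :
    ∀ (c : Int), pvLastL W (PySem.List.pyGetD fp r []) c = pvVis fp R W 0 (-1) hd r c := by
  have main : ∀ (n : Nat) (c : Int), (c + 1).toNat ≤ n →
      pvLastL W (PySem.List.pyGetD fp r []) c = pvVis fp R W 0 (-1) hd r c := by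
    intro n
    induction n with
    | zero =>
      intro c hc
      rw [pvLastL, pvVis, if_neg (by omega), if_neg (by omega)]
    | succ m ih =>
      intro c hc
      rw [pvLastL, pvVis]
      by_cases hb : 0 ≤ c ∧ c < W
      · have h4 : 0 ≤ r ∧ r < R ∧ 0 ≤ c ∧ c < W := ⟨hr.1, hr.2, hb.1, hb.2⟩
        rw [if_pos hb, if_pos h4]
        dsimp only
        rw [show PySem.List.pyGetD (PySem.List.pyGetD fp r []) c "" = pvCellB fp r c from rfl]
        by_cases hs : pvSeat (pvCellB fp r c) = true
        · rw [if_pos hs, if_pos hs]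
        · rw [if_neg hs]
          rw [if_neg hs,
              show r + (0 : Int) = r by ring, show c + (-1 : Int) = c - 1 by ring]
          exact ih (c - 1) (by omega)
      · rw [if_neg hb, if_neg (by tauto)]
  exact fun c => main (c + 1).toNat c (le_refl _)

theorem pvLastR_eq (fp : List (List String)) (R W : Int)
    (hd : ((0 : Int), (1 : Int)) ∈ pvDirsSpec) (r : Int) (hr : 0 ≤ r ∧ r < R) :
    ∀ (c : Int), pvLastR W (PySem.List.pyGetD fp r []) c = pvVis fp R W 0 1 hd r c := by
  have main : ∀ (n : Nat) (c : Int), (W - c).toNat ≤ n →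
      pvLastR W (PySem.List.pyGetD fp r []) c = pvVis fp R W 0 1 hd r c := by
    intro n
    induction n with
    | zero =>
      intro c hc
      rw [pvLastR, pvVis, if_neg (by omega), if_neg (by omega)]
    | succ m ih =>
      intro c hc
      rw [pvLastR, pvVis]
      by_cases hb : 0 ≤ c ∧ c < W
      · have h4 : 0 ≤ r ∧ r < R ∧ 0 ≤ c ∧ c < W := ⟨hr.1, hr.2, hb.1, hb.2⟩
        rw [if_pos hb, if_pos h4]
        dsimp only
        rw [show PySem.List.pyGetD (PySem.List.pyGetD fp r []) c "" = pvCellB fp r c from rfl]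
        by_cases hs : pvSeat (pvCellB fp r c) = true
        · rw [if_pos hs, if_pos hs]
        · rw [if_neg hs]
          rw [if_neg hs, show r + (0 : Int) = r by ring]
          exact ih (c + 1) (by omega)
      · rw [if_neg hb, if_neg (by tauto)]
  exact fun c => main (W - c).toNat c (le_refl _)

theorem pvRowL_eq (W : Int) (row : List String) (hW : 0 ≤ W) :
    pvRowL W row =
      (PySem.List.pyRange 0 W 1).map (fun c => pvLastL W row (c - 1)) := by
  have key : ∀ n : Nat, (n : Int) ≤ W →
      ((PySem.List.pyRange 0 (n : Int) 1).foldl (fun st c =>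
          let v := PySem.List.pyGetD row c ""
          (st.1 ++ [st.2], if pvSeat v then some v else st.2))
        (([] : List (Option String)), (none : Option String))) =
      ((PySem.List.pyRange 0 (n : Int) 1).map (fun c => pvLastL W row (c - 1)),
       pvLastL W row ((n : Int) - 1)) := by
    intro n
    induction n with
    | zero =>
      intro _
      rw [pvLastL, if_neg (by omega)]
      simp [PySem.List.pyRange_one_eq_nil]
    | succ m ih =>
      intro hle
      have hcast : ((m + 1 : Nat) : Int) = (m : Int) + 1 := by omega
      rw [hcast, PySem.List.pyRange_one_succ_right (by positivity), List.foldl_append,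
          ih (by omega), List.map_append]
      simp only [List.foldl_cons, List.foldl_nil, List.map_cons, List.map_nil,
        Prod.mk.injEq]
      have hm : (0 : Int) ≤ (m : Int) ∧ (m : Int) < W := ⟨by positivity, by omega⟩
      constructor
      · simp
      · rw [show (m : Int) + 1 - 1 = (m : Int) by ring]
        conv_rhs => rw [pvLastL]
        rw [if_pos hm]
  unfold pvRowL
  obtain ⟨n, rfl⟩ : ∃ n : Nat, W = (n : Int) := ⟨W.toNat, by omega⟩
  rw [key n (le_refl _)]

theorem pvRowR_eq (W : Int) (row : List String) (hW : 0 ≤ W) :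
    pvRowR W row =
      (PySem.List.pyRange 0 W 1).map (fun c => pvLastR W row (c + 1)) := by
  have key : ∀ n : Nat, (n : Int) ≤ W →
      ((PySem.List.pyRange (W - 1) (W - 1 - (n : Int)) (-1)).foldl (fun st c =>
          let v := PySem.List.pyGetD row c ""
          (st.2 :: st.1, if pvSeat v then some v else st.2))
        (([] : List (Option String)), (none : Option String))) =
      ((PySem.List.pyRange (W - (n : Int)) W 1).map (fun c => pvLastR W row (c + 1)),
       pvLastR W row (W - (n : Int))) := by
    intro n
    induction n with
    | zero =>
      intro _
      rw [pvLastR, if_neg (by omega)]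
      simp [PySem.List.pyRange_neg_one_eq_nil, PySem.List.pyRange_one_eq_nil]
    | succ m ih =>
      intro hle
      have hcast : ((m + 1 : Nat) : Int) = (m : Int) + 1 := by omega
      have hsplit : PySem.List.pyRange (W - 1) (W - 1 - ((m + 1 : Nat) : Int)) (-1) =
          PySem.List.pyRange (W - 1) (W - 1 - (m : Int)) (-1) ++ [W - 1 - (m : Int)] := by
        rw [hcast, pvRange_neg_one_snoc _ _ (by omega)]
        congr 1 <;> ring
      rw [hsplit, List.foldl_append, ih (by omega)]
      simp only [List.foldl_cons, List.foldl_nil, Prod.mk.injEq]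
      constructor
      · rw [hcast]
        conv_rhs => rw [PySem.List.pyRange_one_cons (show W - ((m : Int) + 1) < W by omega),
            List.map_cons]
        rw [show W - ((m : Int) + 1) + 1 = W - (m : Int) by ring]
      · rw [hcast, show W - ((m : Int) + 1) = W - 1 - (m : Int) by ring]
        have hm : (0 : Int) ≤ W - 1 - (m : Int) ∧ W - 1 - (m : Int) < W := ⟨by omega, by omega⟩
        conv_rhs => rw [pvLastR]
        rw [if_pos hm]
        rw [show W - 1 - (m : Int) + 1 = W - (m : Int) by ring]
  unfold pvRowR
  obtain ⟨n, rfl⟩ : ∃ n : Nat, W = (n : Int) := ⟨W.toNat, by omega⟩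
  have h1 : PySem.List.pyRange ((n : Int) - 1) (-1) (-1) =
      PySem.List.pyRange ((n : Int) - 1) ((n : Int) - 1 - (n : Int)) (-1) := by
    congr 1
    ring
  rw [h1, key n (le_refl _), show (n : Int) - (n : Int) = 0 by ring]

theorem pvHd0 : ((-1 : Int), (-1 : Int)) ∈ pvDirsSpec := by decide
theorem pvHd1 : ((-1 : Int), (0 : Int)) ∈ pvDirsSpec := by decide
theorem pvHd2 : ((-1 : Int), (1 : Int)) ∈ pvDirsSpec := by decide
theorem pvHd3 : ((0 : Int), (-1 : Int)) ∈ pvDirsSpec := by decide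
theorem pvHd4 : ((0 : Int), (1 : Int)) ∈ pvDirsSpec := by decide
theorem pvHd5 : ((1 : Int), (-1 : Int)) ∈ pvDirsSpec := by decide
theorem pvHd6 : ((1 : Int), (0 : Int)) ∈ pvDirsSpec := by decide
theorem pvHd7 : ((1 : Int), (1 : Int)) ∈ pvDirsSpec := by decide

theorem pvIteAdd (P : Prop) [Decidable P] (s : Int) :
    (if P then s + 1 else s) = s + (if P then 1 else 0) := by
  split <;> ring

theorem pvCount_eq (fp : List (List String)) (R W : Int)
    (hR : R = (fp.length : Int)) (hW : W = ((PySem.List.pyGetD fp 0 []).length : Int))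
    (r c : Int) (hr : 0 ≤ r ∧ r < R) (hc : 0 ≤ c ∧ c < W) :
    (PySem.List.pyRange 0 8 1).foldl (fun occ d =>
        let dr := PySem.List.pyGetD pvDirR d 0
        let dc := PySem.List.pyGetD pvDirC d 0
        occ + pvWalkA fp R W dr dc ((R + W).toNat + 1) (r + dr) (c + dc)) 0 =
      pvOcc2 ((PySem.List.pyRange 0 R 1).map (fun r =>
        (PySem.List.pyRange 0 W 1).map (fun c =>
          ([pvSweepVert fp R W (-1) (-1), pvSweepVert fp R W (-1) 0, pvSweepVert fp R W (-1) 1,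
            pvSweepVert fp R W 1 (-1), pvSweepVert fp R W 1 0, pvSweepVert fp R W 1 1,
            fp.map (fun row => pvRowL W row), fp.map (fun row => pvRowR W row)]).foldl
            (fun s g => if pvGrid2 g r c = some "#" then s + 1 else s) (0 : Int)))) r c := by
  have hR0 : 0 ≤ R := by omega
  have hW0 : 0 ≤ W := by omega
  -- right-hand side: look up the cell of the occupancy grid
  unfold pvOcc2
  rw [PySem.List.pyGetD_map_pyRange_of_nonneg _ _ _ _ hr.1 hr.2,
      PySem.List.pyGetD_map_pyRange_of_nonneg _ _ _ _ hc.1 hc.2]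
  -- rewrite the six vertical sweep grids and the two row sweep grids to pvVis values
  have hgrid : ∀ (dr dc : Int) (hd : (dr, dc) ∈ pvDirsSpec),
      pvGrid2 ((PySem.List.pyRange 0 R 1).map (pvVisRow fp R W dr dc hd)) r c =
        pvVis fp R W dr dc hd (r + dr) (c + dc) := by
    intro dr dc hd
    unfold pvGrid2 pvVisRow
    rw [PySem.List.pyGetD_map_pyRange_of_nonneg _ _ _ _ hr.1 hr.2,
        PySem.List.pyGetD_map_pyRange_of_nonneg _ _ _ _ hc.1 hc.2]
  have hrowmapL : PySem.List.pyGetD (fp.map (fun row => pvRowL W row)) r [] =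
      pvRowL W (PySem.List.pyGetD fp r []) := by
    rw [PySem.List.pyGetD_eq_getElem _ _ hr.1 (by simpa [hR] using hr.2),
        PySem.List.pyGetD_eq_getElem _ _ hr.1 (by simpa [hR] using hr.2),
        List.getElem_map]
  have hrowmapR : PySem.List.pyGetD (fp.map (fun row => pvRowR W row)) r [] =
      pvRowR W (PySem.List.pyGetD fp r []) := by
    rw [PySem.List.pyGetD_eq_getElem _ _ hr.1 (by simpa [hR] using hr.2),
        PySem.List.pyGetD_eq_getElem _ _ hr.1 (by simpa [hR] using hr.2),
        List.getElem_map]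
  have hgridL : pvGrid2 (fp.map (fun row => pvRowL W row)) r c =
      pvVis fp R W 0 (-1) pvHd3 (r + 0) (c + -1) := by
    unfold pvGrid2
    rw [hrowmapL, pvRowL_eq W _ hW0,
        PySem.List.pyGetD_map_pyRange_of_nonneg _ _ _ _ hc.1 hc.2,
        pvLastL_eq fp R W pvHd3 r hr (c - 1),
        show r + (0 : Int) = r by ring, show c + (-1 : Int) = c - 1 by ring]
  have hgridR : pvGrid2 (fp.map (fun row => pvRowR W row)) r c =
      pvVis fp R W 0 1 pvHd4 (r + 0) (c + 1) := by
    unfold pvGrid2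
    rw [hrowmapR, pvRowR_eq W _ hW0,
        PySem.List.pyGetD_map_pyRange_of_nonneg _ _ _ _ hc.1 hc.2,
        pvLastR_eq fp R W pvHd4 r hr (c + 1),
        show r + (0 : Int) = r by ring]
  simp only [List.foldl_cons, List.foldl_nil]
  rw [pvSweepVert_up fp R W (-1) pvHd0 hR0, pvSweepVert_up fp R W 0 pvHd1 hR0,
      pvSweepVert_up fp R W 1 pvHd2 hR0, pvSweepVert_down fp R W (-1) pvHd5 hR0,
      pvSweepVert_down fp R W 0 pvHd6 hR0, pvSweepVert_down fp R W 1 pvHd7 hR0]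
  rw [hgrid (-1) (-1) pvHd0, hgrid (-1) 0 pvHd1, hgrid (-1) 1 pvHd2,
      hgrid 1 (-1) pvHd5, hgrid 1 0 pvHd6, hgrid 1 1 pvHd7, hgridL, hgridR]
  -- left-hand side: the eight ray walks
  rw [show PySem.List.pyRange 0 8 1 = ([0, 1, 2, 3, 4, 5, 6, 7] : List Int) from by decide]
  simp only [List.foldl_cons, List.foldl_nil]
  rw [show PySem.List.pyGetD pvDirR (0 : Int) 0 = -1 from by decide,
      show PySem.List.pyGetD pvDirC (0 : Int) 0 = -1 from by decide,
      show PySem.List.pyGetD pvDirR (1 : Int) 0 = -1 from by decide,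
      show PySem.List.pyGetD pvDirC (1 : Int) 0 = 0 from by decide,
      show PySem.List.pyGetD pvDirR (2 : Int) 0 = -1 from by decide,
      show PySem.List.pyGetD pvDirC (2 : Int) 0 = 1 from by decide,
      show PySem.List.pyGetD pvDirR (3 : Int) 0 = 0 from by decide,
      show PySem.List.pyGetD pvDirC (3 : Int) 0 = 1 from by decide,
      show PySem.List.pyGetD pvDirR (4 : Int) 0 = 1 from by decide,
      show PySem.List.pyGetD pvDirC (4 : Int) 0 = 1 from by decide,
      show PySem.List.pyGetD pvDirR (5 : Int) 0 = 1 from by decide,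
      show PySem.List.pyGetD pvDirC (5 : Int) 0 = 0 from by decide,
      show PySem.List.pyGetD pvDirR (6 : Int) 0 = 1 from by decide,
      show PySem.List.pyGetD pvDirC (6 : Int) 0 = -1 from by decide,
      show PySem.List.pyGetD pvDirR (7 : Int) 0 = 0 from by decide,
      show PySem.List.pyGetD pvDirC (7 : Int) 0 = -1 from by decide]
  rw [pvWalkA_eq fp R W (-1) (-1) pvHd0 ((R + W).toNat + 1) (r + (-1)) (c + (-1))
      (by simp only [pvMeasure]; split_ifs <;> omega)]
  rw [pvWalkA_eq fp R W (-1) (0) pvHd1 ((R + W).toNat + 1) (r + (-1)) (c + (0))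
      (by simp only [pvMeasure]; split_ifs <;> omega)]
  rw [pvWalkA_eq fp R W (-1) (1) pvHd2 ((R + W).toNat + 1) (r + (-1)) (c + (1))
      (by simp only [pvMeasure]; split_ifs <;> omega)]
  rw [pvWalkA_eq fp R W (0) (1) pvHd4 ((R + W).toNat + 1) (r + (0)) (c + (1))
      (by simp only [pvMeasure]; split_ifs <;> omega)]
  rw [pvWalkA_eq fp R W (1) (1) pvHd7 ((R + W).toNat + 1) (r + (1)) (c + (1))
      (by simp only [pvMeasure]; split_ifs <;> omega)]
  rw [pvWalkA_eq fp R W (1) (0) pvHd6 ((R + W).toNat + 1) (r + (1)) (c + (0))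
      (by simp only [pvMeasure]; split_ifs <;> omega)]
  rw [pvWalkA_eq fp R W (1) (-1) pvHd5 ((R + W).toNat + 1) (r + (1)) (c + (-1))
      (by simp only [pvMeasure]; split_ifs <;> omega)]
  rw [pvWalkA_eq fp R W (0) (-1) pvHd3 ((R + W).toNat + 1) (r + (0)) (c + (-1))
      (by simp only [pvMeasure]; split_ifs <;> omega)]
  simp only [pvIteAdd]
  ring

-- ===== VERDICT (by name: the statement is the Claim_ definition above) =====
theorem p2_iterate_spec : Claim_equal_p2_iterate := by
  unfold Claim_equal_p2_iterate Spec_p2_iterate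
  intro fp _hdom _hpre
  unfold p2_iterate p2_iterate_alt
  dsimp only
  rw [List.map_id']
  apply PySem.List.foldl_congr_mem
  intro acc r hrm
  apply PySem.List.foldl_congr_mem
  intro acc2 c hcm
  have hr : 0 ≤ r ∧ r < (fp.length : Int) := by
    simpa [PySem.List.mem_pyRange_one] using hrm
  have hc : 0 ≤ c ∧ c < ((PySem.List.pyGetD fp 0 []).length : Int) := by
    simpa [PySem.List.mem_pyRange_one] using hcm
  rw [show pvCellA = pvCellB from rfl, show pvSetCellA = pvSetCellB from rfl]
  rw [pvCount_eq fp _ _ rfl rfl r c hr hc]
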